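-- pv_equiv track=rewrite | github.com/pypi-data/pypi-mirror-142 | packages/w-tool/w_tool-0.0.6-py3-none-any.whl/tools/utils.py | hex_str_to_ascii
-- ===== SOURCE A (Python) =====
-- def hex_str_to_ascii(hex_str, seg='', s_count=2):
--     hex_li = hex_str.split(' ')
--     len_li = len(hex_li)
--     li = []
--     j = 0
--     s = ''
--     for i in range(len_li):
--         s += chr(int(hex_li[i], 16))
--         j += 1
--         if j == s_count:
--             li.append(s)
--             s = ''
--             j = 0
--     else:
--         if s:
--             li.append(s)
--     return seg.join(li)
-- ===== SOURCE B (Python) =====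
-- def hex_str_to_ascii(hex_str, seg='', s_count=2):
--     chars = [chr(int(t, 16)) for t in hex_str.split(' ')]
--     if s_count <= 0:
--         return ''.join(chars)
--     groups = [''.join(chars[i:i + s_count]) for i in range(0, len(chars), s_count)]
--     return seg.join(groups)
-- ===== Notes on version B (the rewrite author's own statement) =====
-- stated objective: alternative
-- what changed: Replaces the interleaved accumulate-and-count loop (running string s, counter j, conditional flush) by two separate shaped passes: convert every token to its character first, then cut the character list into s_count-sized windows by range-step slicing and join them.
-- outside the precondition, e.g. on hex_str_to_ascii('110000', '', 2): A raises ValueError, B raises ValueError; on hex_str_to_ascii('zz 41', '-', 2): A raises ValueError, B raises ValueError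
import Mathlib
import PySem

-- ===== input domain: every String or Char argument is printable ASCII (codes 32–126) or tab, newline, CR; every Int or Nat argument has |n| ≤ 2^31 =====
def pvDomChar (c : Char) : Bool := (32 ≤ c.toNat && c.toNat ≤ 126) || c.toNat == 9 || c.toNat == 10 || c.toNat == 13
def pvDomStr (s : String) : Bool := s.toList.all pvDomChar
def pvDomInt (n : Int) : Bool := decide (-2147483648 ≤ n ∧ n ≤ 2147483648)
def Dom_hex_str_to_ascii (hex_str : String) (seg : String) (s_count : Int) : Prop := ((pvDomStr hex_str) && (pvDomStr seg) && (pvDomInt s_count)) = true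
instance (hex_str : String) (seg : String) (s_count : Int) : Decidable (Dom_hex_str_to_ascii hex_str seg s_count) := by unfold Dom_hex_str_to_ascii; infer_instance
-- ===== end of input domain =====

-- B replaces A's interleaved accumulate-and-count loop by two separate passes (convert all tokens to characters,
-- then cut into s_count-sized windows by range-step slicing); a different decomposition of the same cost.


-- chr(int(t, 16)) for one token; exact on Pre_'s domain (a valid hex literal naming a valid Unicode scalar value)
def pvHexChr (t : List Char) : Char := Char.ofNat ((PySem.Int.ofCharsBase? t 16).getD 0).toNat

-- ===== PORT A =====
def hex_str_to_ascii (hex_str : String) (seg : String) (s_count : Int) : String :=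
  let hex_li := PySem.Chars.splitOn hex_str.toList [' ']
  let len_li := PySem.List.len hex_li
  -- state (li, j, s); 'for i in range(len_li)'
  let st := (PySem.List.pyRange 0 len_li 1).foldl
    (fun (st : List (List Char) × Int × List Char) i =>
      let s := st.2.2 ++ [pvHexChr (PySem.List.pyGetD hex_li i [])]
      let j := st.2.1 + 1
      if j = s_count then (st.1 ++ [s], 0, ([] : List Char)) else (st.1, j, s))
    ([], 0, ([] : List Char))
  let li := if st.2.2 ≠ [] then st.1 ++ [st.2.2] else st.1
  String.ofList (PySem.Chars.join seg.toList li)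

-- ===== PORT B =====
def hex_str_to_ascii_alt (hex_str : String) (seg : String) (s_count : Int) : String :=
  let chars := (PySem.Chars.splitOn hex_str.toList [' ']).map pvHexChr
  if s_count ≤ 0 then
    String.ofList chars        -- ''.join(chars)
  else
    -- [''.join(chars[i:i+s_count]) for i in range(0, len(chars), s_count)]; ''.join of 1-char strings is the slice itself
    let groups := (PySem.List.pyRange 0 (PySem.List.len chars) s_count).map
      (fun i => PySem.List.slice chars (some i) (some (i + s_count)))
    String.ofList (PySem.Chars.join seg.toList groups)

-- ===== PRECONDITION & SPEC =====
-- Pre_ excludes exactly the inputs on which Python A raises or leaves the portable string type: a token that is not a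
-- valid base-16 integer literal (int raises ValueError), or one whose value is outside range(0x110000) (chr raises
-- ValueError), or a lone-surrogate code point U+D800..U+DFFF, where Python's chr returns a str with no counterpart in
-- the port's String type (see claim cites).
def Pre_hex_str_to_ascii (hex_str : String) (seg : String) (s_count : Int) : Prop :=
  ((PySem.Chars.splitOn hex_str.toList [' ']).all (fun t =>
    match PySem.Int.ofCharsBase? t 16 with
    | none => false
    | some v => decide (0 ≤ v ∧ (v < 55296 ∨ (57344 ≤ v ∧ v < 1114112))))) = true
instance (hex_str : String) (seg : String) (s_count : Int) : Decidable (Pre_hex_str_to_ascii hex_str seg s_count) := by unfold Pre_hex_str_to_ascii; infer_instance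

def pvWitness_hex_str_to_ascii : String × String × Int := ("48 65 6c 6c 6f", "-", 2)

def Spec_hex_str_to_ascii (hex_str : String) (seg : String) (s_count : Int) (out : String) : Prop := out = hex_str_to_ascii_alt hex_str seg s_count
instance (hex_str : String) (seg : String) (s_count : Int) (out : String) : Decidable (Spec_hex_str_to_ascii hex_str seg s_count out) := by unfold Spec_hex_str_to_ascii; infer_instance

-- ===== CLAIM (what is proved, stated in full; the proofs are below) =====
def Claim_equal_hex_str_to_ascii : Prop := ∀ (hex_str : String) (seg : String) (s_count : Int), Dom_hex_str_to_ascii hex_str seg s_count → Pre_hex_str_to_ascii hex_str seg s_count → Spec_hex_str_to_ascii hex_str seg s_count (hex_str_to_ascii hex_str seg s_count)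

-- ===== LEMMAS AND PROOFS =====

-- A's loop body, with the character already computed
def pvStepA (s_count : Int) (st : List (List Char) × Int × List Char) (c : Char) :
    List (List Char) × Int × List Char :=
  let s := st.2.2 ++ [c]
  let j := st.2.1 + 1
  if j = s_count then (st.1 ++ [s], 0, ([] : List Char)) else (st.1, j, s)

-- cs cut into windows of size k+1
def pvChunk (k : Nat) : List Char → List (List Char)
  | [] => []
  | c :: rest => (c :: rest.take k) :: pvChunk k (rest.drop k)
termination_by cs => cs.length
decreasing_by simp

theorem pvChunk_nil (k : Nat) : pvChunk k [] = [] := by rw [pvChunk.eq_def]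

theorem pvChunk_cons (k : Nat) (c : Char) (rest : List Char) :
    pvChunk k (c :: rest) = (c :: rest.take k) :: pvChunk k (rest.drop k) := by rw [pvChunk.eq_def]

theorem pvChunk_short (k : Nat) (s : List Char) (h : s.length ≤ k + 1) (hne : s ≠ []) :
    pvChunk k s = [s] := by
  cases s with
  | nil => exact absurd rfl hne
  | cons c rest =>
    rw [pvChunk_cons]
    have h1 : rest.length ≤ k := by simp at h; omega
    rw [List.take_of_length_le h1, List.drop_eq_nil_of_le h1, pvChunk_nil]

theorem pvFoldA_nonpos (s_count : Int) (hsc : s_count ≤ 0) (cs : List Char) :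
    ∀ (li : List (List Char)) (j : Int) (s : List Char), 0 ≤ j →
    cs.foldl (pvStepA s_count) (li, j, s) = (li, j + cs.length, s ++ cs) := by
  induction cs with
  | nil => intro li j s hj; simp
  | cons c rest ih =>
    intro li j s hj
    have hne : ¬ (j + 1 = s_count) := by omega
    simp only [List.foldl_cons, pvStepA, if_neg hne]
    rw [ih _ _ _ (by omega)]
    simp
    omega

theorem pvFoldA_pos (k : Nat) (cs : List Char) :
    ∀ (li : List (List Char)) (s : List Char), s.length ≤ k →
    (let r := cs.foldl (pvStepA ((k : Int) + 1)) (li, (s.length : Int), s)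
     (if r.2.2 ≠ [] then r.1 ++ [r.2.2] else r.1)) = li ++ pvChunk k (s ++ cs) := by
  induction cs with
  | nil =>
    intro li s hs
    simp only [List.foldl_nil, List.append_nil]
    by_cases hne : s = []
    · subst hne; simp [pvChunk_nil]
    · rw [if_pos (by simpa using hne), pvChunk_short k s (by omega) hne]
  | cons c rest ih =>
    intro li s hs
    by_cases hfull : s.length = k
    · have hcond : (s.length : Int) + 1 = (k : Int) + 1 := by omega
      simp only [List.foldl_cons, pvStepA, if_pos hcond]
      have h0 := ih (li ++ [s ++ [c]]) [] (by simp)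
      simp only [List.length_nil, Nat.cast_zero, List.nil_append] at h0
      rw [h0]
      have hchunk : pvChunk k (s ++ c :: rest) = (s ++ [c]) :: pvChunk k rest := by
        cases s with
        | nil => simp at hfull; subst hfull; simp [pvChunk_cons]
        | cons a s' =>
          simp only [List.cons_append]
          rw [pvChunk_cons]
          have hl : s'.length = k - 1 := by simp at hfull; omega
          have hk : 1 ≤ k := by simp at hfull; omega
          rw [show s' ++ c :: rest = (s' ++ [c]) ++ rest by simp]
          rw [List.take_append_of_le_length (by simp; omega),
              List.drop_append_of_le_length (by simp; omega)]
          rw [List.take_of_length_le (by simp; omega),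
              List.drop_eq_nil_of_le (by simp; omega)]
          simp
      rw [hchunk]; simp
    · have hcond : ¬ ((s.length : Int) + 1 = (k : Int) + 1) := by
        intro h; apply hfull; omega
      simp only [List.foldl_cons, pvStepA, if_neg hcond]
      have h0 := ih li (s ++ [c]) (by simp; omega)
      simp only [List.length_append, List.length_singleton] at h0
      rw [show ((s.length : Int) + 1) = ((s.length + 1 : Nat) : Int) by push_cast; ring]
      rw [h0]
      simp

theorem pvRange_step_cons (b st : Int) (hb : 0 < b) (hst : 0 < st) :
    PySem.List.pyRange 0 b st = 0 :: (PySem.List.pyRange 0 (b - st) st).map (· + st) := by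
  rw [PySem.List.pyRange_of_pos _ _ hst, PySem.List.pyRange_of_pos _ _ hst]
  rw [if_pos (by omega : (0:Int) < b)]
  have hdiv : (b - 0 + st - 1) / st = (b - 1) / st + 1 := by
    rw [show b - 0 + st - 1 = (b - 1) + 1 * st by ring,
        Int.add_mul_ediv_right _ _ (by omega : st ≠ 0)]
  have hq0 : 0 ≤ (b - 1) / st := Int.ediv_nonneg (by omega) (by omega)
  have hcnt : (b - 0 + st - 1) / st = ((b - 1) / st).toNat + 1 := by omega
  by_cases h2 : (0:Int) < b - st
  · rw [if_pos h2]
    have hcnt2 : (b - st - 0 + st - 1) / st = (b - 1) / st := by ring_nf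
    rw [hcnt, hcnt2]
    have : ((((b - 1) / st).toNat : Int) + 1).toNat = ((b - 1) / st).toNat + 1 := by omega
    rw [this, List.range_succ_eq_map]
    simp only [List.map_cons, List.map_map]
    congr 1
    · simp
    · apply List.map_congr_left
      intro x hx
      simp only [Function.comp_apply]
      push_cast
      ring
  · rw [if_neg h2]
    have hz : (b - 1) / st = 0 := Int.ediv_eq_zero_of_lt (by omega) (by omega)
    rw [hcnt, hz]
    simp

theorem pvSliceChunks (k : Nat) :
    ∀ (n : Nat) (cs : List Char), cs.length ≤ n →
    (PySem.List.pyRange 0 (PySem.List.len cs) ((k : Int) + 1)).map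
      (fun i => PySem.List.slice cs (some i) (some (i + ((k : Int) + 1)))) = pvChunk k cs := by
  intro n
  induction n with
  | zero =>
    intro cs h
    have : cs = [] := List.eq_nil_of_length_eq_zero (by omega)
    subst this
    rw [show PySem.List.len ([] : List Char) = 0 by simp [PySem.List.len_eq]]
    rw [PySem.List.pyRange_of_pos _ _ (by omega : (0:Int) < (k:Int)+1)]
    simp [pvChunk_nil]
  | succ n ih =>
    intro cs h
    cases cs with
    | nil =>
      rw [show PySem.List.len ([] : List Char) = 0 by simp [PySem.List.len_eq]]
      rw [PySem.List.pyRange_of_pos _ _ (by omega : (0:Int) < (k:Int)+1)]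
      simp [pvChunk_nil]
    | cons c rest =>
      have hst : (0:Int) < (k:Int) + 1 := by omega
      have hb : (0:Int) < PySem.List.len (c :: rest) := by simp [PySem.List.len_eq]
      rw [pvRange_step_cons _ _ hb hst, List.map_cons, List.map_map]
      -- head: (c :: rest)[0 : k+1] = c :: rest.take k
      have hhead : PySem.List.slice (c :: rest) (some 0) (some (0 + ((k:Int)+1))) = c :: rest.take k := by
        rw [show (0 : Int) + ((k:Int)+1) = (k:Int)+1 by ring]
        rw [PySem.List.slice_zero_start, PySem.List.slice_to _ (by omega)]
        have hnn : ((k:Int)+1).toNat = k + 1 := by omega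
        rw [hnn, List.take_succ_cons]
      rw [hhead, pvChunk_cons]
      congr 1
      -- tail: shift every index down by k+1 and drop the first k+1 characters
      have hdrop : rest.drop k = (c :: rest).drop (k+1) := by simp
      by_cases hlen : k + 1 < (c :: rest).length
      · have hlen' : k + 1 < rest.length + 1 := by simpa using hlen
        have hlen2 : PySem.List.len (c :: rest) - ((k:Int)+1) =
            PySem.List.len ((c :: rest).drop (k+1)) := by
          simp [PySem.List.len_eq]; omega
        rw [hlen2]
        have hmap : ∀ i ∈ PySem.List.pyRange 0 (PySem.List.len ((c :: rest).drop (k+1))) ((k:Int)+1),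
            PySem.List.slice (c :: rest) (some (i + ((k:Int)+1))) (some (i + ((k:Int)+1) + ((k:Int)+1)))
            = PySem.List.slice ((c :: rest).drop (k+1)) (some i) (some (i + ((k:Int)+1))) := by
          intro i hi
          have h0i : 0 ≤ i := ((PySem.List.mem_pyRange_iff_of_pos hst i).1 hi).1
          rw [PySem.List.slice_toNat _ (by omega) (by omega),
              PySem.List.slice_toNat _ (by omega) (by omega)]
          rw [List.drop_drop]
          congr 1
          · omega
          · congr 1; omega
        calc ((PySem.List.pyRange 0 (PySem.List.len ((c :: rest).drop (k+1))) ((k:Int)+1)).map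
                (fun i => PySem.List.slice (c :: rest) (some (i + ((k:Int)+1))) (some (i + ((k:Int)+1) + ((k:Int)+1)))))
            = (PySem.List.pyRange 0 (PySem.List.len ((c :: rest).drop (k+1))) ((k:Int)+1)).map
                (fun i => PySem.List.slice ((c :: rest).drop (k+1)) (some i) (some (i + ((k:Int)+1)))) :=
              List.map_congr_left hmap
          _ = pvChunk k ((c :: rest).drop (k+1)) := ih _ (by simp at h ⊢; omega)
          _ = pvChunk k (rest.drop k) := by rw [hdrop]
      · -- everything fits in the first window: both sides are empty
        have hlen' : rest.length ≤ k := by simp at hlen; omega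
        have h1 : PySem.List.len (c :: rest) - ((k:Int)+1) ≤ 0 := by
          simp [PySem.List.len_eq]; omega
        have h2 : PySem.List.pyRange 0 (PySem.List.len (c :: rest) - ((k:Int)+1)) ((k:Int)+1) = [] := by
          rw [PySem.List.pyRange_of_pos _ _ hst, if_neg (by omega)]
          simp
        have h3 : rest.drop k = [] := List.drop_eq_nil_of_le (by simp at hlen; omega)
        rw [h2, h3, pvChunk_nil]
        simp
  -- (the `fun i => slice … ∘ (· + (k+1))` compositions above are handled definitionally by map_map)

-- ===== VERDICT (by name: the statement is the Claim_ definition above) =====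
theorem hex_str_to_ascii_spec : Claim_equal_hex_str_to_ascii := by
  intro hex_str seg s_count _ _
  unfold Spec_hex_str_to_ascii hex_str_to_ascii hex_str_to_ascii_alt
  set toks := PySem.Chars.splitOn hex_str.toList [' '] with htoks
  -- A's index loop over range(len) is the fold of pvStepA over the character list
  have hfold : (PySem.List.pyRange 0 (PySem.List.len toks) 1).foldl
      (fun (st : List (List Char) × Int × List Char) i =>
        let s := st.2.2 ++ [pvHexChr (PySem.List.pyGetD toks i [])]
        let j := st.2.1 + 1
        if j = s_count then (st.1 ++ [s], 0, ([] : List Char)) else (st.1, j, s))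
      ([], 0, ([] : List Char))
      = (toks.map pvHexChr).foldl (pvStepA s_count) ([], 0, ([] : List Char)) := by
    rw [List.foldl_map]
    exact PySem.List.foldl_pyRange_zero_pyGetD toks [] (fun st t => pvStepA s_count st (pvHexChr t)) _
  simp only
  rw [hfold]
  set chars := toks.map pvHexChr with hchars
  by_cases hsc : s_count ≤ 0
  · rw [if_pos hsc]
    rw [pvFoldA_nonpos s_count hsc chars [] 0 [] le_rfl]
    simp only [List.nil_append]
    by_cases hne : chars = []
    · rw [hne]; simp
    · rw [if_pos (by simpa using hne)]
      simp [PySem.Chars.join_singleton]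
  · rw [if_neg hsc]
    obtain ⟨k, hk⟩ : ∃ k : Nat, s_count = (k : Int) + 1 := ⟨(s_count - 1).toNat, by omega⟩
    subst hk
    have hA := pvFoldA_pos k chars [] [] (by simp)
    simp only [List.length_nil, Nat.cast_zero, List.nil_append] at hA
    rw [hA]
    rw [pvSliceChunks k chars.length chars le_rfl]
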